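-- pv_equiv track=rewrite | github.com/Neurojedi/Biofunctions | proteins/MassSpectrum.py | Cyclospectrum
-- ===== SOURCE A (Python) =====
-- def Cyclospectrum(masses):
--     result = [0]
--     masses = [int(mass) for mass in masses]
--     acc = masses.copy()
--     result.extend(acc)
--     new_element = acc.copy()
--     for j in range(len(masses) - 2):
--         for i in range(len(acc)):
--             index = (i+j+1) % len(acc)
--             new_element[i] += acc[index]
--         result.extend(new_element)
--     result.append(sum(acc))
--     result=sorted(result)
--     return result
-- ===== SOURCE B (Python) =====
-- def Cyclospectrum(masses):
--     masses = [int(mass) for mass in masses]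
--     n = len(masses)
--     doubled = masses + masses
--     pref = [0]
--     s = 0
--     for x in doubled:
--         s += x
--         pref.append(s)
--     spectrum = [0] + masses
--     for L in range(2, n):
--         for i in range(n):
--             spectrum.append(pref[i + L] - pref[i])
--     spectrum.append(pref[n])
--     return sorted(spectrum)
-- ===== Notes on version B (the rewrite author's own statement) =====
-- stated objective: alternative
-- what changed: Replaces the mutable window vector that is extended in place inside A's nested loop by a prefix-sum table over the doubled mass list, so each cyclic subpeptide mass is a single subtraction pref[i+L]-pref[i] instead of an incremental in-place accumulation.
import Mathlib
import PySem

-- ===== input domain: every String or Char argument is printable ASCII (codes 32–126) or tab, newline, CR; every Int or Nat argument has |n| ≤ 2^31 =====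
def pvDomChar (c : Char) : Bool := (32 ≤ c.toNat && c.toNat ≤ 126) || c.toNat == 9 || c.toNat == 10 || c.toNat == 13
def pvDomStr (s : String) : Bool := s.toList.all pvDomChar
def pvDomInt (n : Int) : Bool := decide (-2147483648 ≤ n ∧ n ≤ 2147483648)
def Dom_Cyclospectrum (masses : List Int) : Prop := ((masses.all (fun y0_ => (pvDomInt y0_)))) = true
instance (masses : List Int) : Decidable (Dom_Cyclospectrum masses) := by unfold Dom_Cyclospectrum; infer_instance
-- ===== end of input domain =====

-- B replaces A's in-place accumulating window vector by a prefix-sum table over the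
-- doubled mass list, so each cyclic subpeptide mass is a single subtraction of two prefix sums.

-- ===== PORT A =====
-- indices i and (i+j+1) % n are always in range, so getD transcribes acc[...] / new_element[i] exactly
def Cyclospectrum (masses : List Int) : List Int :=
  let acc := masses            -- [int(mass) for mass in masses] is the identity on ints
  let n := acc.length
  let st := (List.range (n - 2)).foldl
    (fun (st : List Int × List Int) j =>
      let ne := (List.range n).foldl
        (fun a i => a.set i (a.getD i 0 + acc.getD ((i + j + 1) % n) 0)) st.2
      (st.1 ++ ne, ne))
    ([0] ++ acc, acc)
  PySem.List.sorted (st.1 ++ [acc.sum]) (fun x => x) false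

-- ===== PORT B =====
-- pref indices are always in range, so getD transcribes pref[...] exactly
def Cyclospectrum_alt (masses : List Int) : List Int :=
  let n := masses.length
  let doubled := masses ++ masses
  let pref := (doubled.foldl (fun (st : List Int × Int) x => (st.1 ++ [st.2 + x], st.2 + x))
      (([0] : List Int), (0 : Int))).1
  let spectrum := (List.range' 2 (n - 2)).foldl
    (fun sp L => (List.range n).foldl
      (fun sp i => sp ++ [pref.getD (i + L) 0 - pref.getD i 0]) sp)
    ([0] ++ masses)
  PySem.List.sorted (spectrum ++ [pref.getD n 0]) (fun x => x) false

-- ===== PRECONDITION & SPEC =====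
def Spec_Cyclospectrum (masses : List Int) (out : List Int) : Prop := out = Cyclospectrum_alt masses
instance (masses : List Int) (out : List Int) : Decidable (Spec_Cyclospectrum masses out) := by unfold Spec_Cyclospectrum; infer_instance

-- ===== CLAIM (what is proved, stated in full; the proofs are below) =====
def Claim_equal_Cyclospectrum : Prop := ∀ (masses : List Int), Dom_Cyclospectrum masses → Spec_Cyclospectrum masses (Cyclospectrum masses)

-- ===== LEMMAS AND PROOFS =====

-- cyclic window sum of length L starting at i
def pvW (acc : List Int) (i L : Nat) : Int :=
  ((List.range L).map (fun k => acc.getD ((i + k) % acc.length) 0)).sum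

-- a write-once ascending update loop is a map
theorem pv_foldl_set_map (g : Int → Nat → Int) :
    ∀ (n : Nat) (ne : List Int), n ≤ ne.length →
    (List.range n).foldl (fun a i => a.set i (g (a.getD i 0) i)) ne
      = (List.range n).map (fun i => g (ne.getD i 0) i) ++ ne.drop n := by
  intro n
  induction n with
  | zero => simp
  | succ n ih =>
    intro ne h
    have hn : n < ne.length := by omega
    have hlen : ((List.range n).map (fun i => g (ne.getD i 0) i)).length = n := by simp
    have hdrop : ne.drop n = ne[n] :: ne.drop (n + 1) := List.drop_eq_getElem_cons hn
    rw [List.range_succ, List.foldl_append, ih ne (by omega)]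
    simp only [List.foldl_cons, List.foldl_nil]
    have hget : ((List.range n).map (fun i => g (ne.getD i 0) i) ++ ne.drop n).getD n 0
        = ne.getD n 0 := by
      rw [List.getD_eq_getElem?_getD, List.getElem?_append_right (le_of_eq hlen), hlen,
        Nat.sub_self, hdrop]
      simp [List.getD_eq_getElem?_getD, List.getElem?_eq_getElem hn]
    rw [hget, List.set_append_right _ _ (le_of_eq hlen), hlen, Nat.sub_self, hdrop,
      List.set_cons_zero, List.map_append]
    simp [List.getD_eq_getElem?_getD, List.getElem?_eq_getElem hn, List.append_assoc]

theorem pv_window_succ (acc : List Int) (i m : Nat) :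
    pvW acc i m + acc.getD ((i + m) % acc.length) 0 = pvW acc i (m + 1) := by
  simp [pvW, List.range_succ]

theorem pv_W_one (acc : List Int) :
    (List.range acc.length).map (fun i => acc[i % acc.length]?.getD 0) = acc := by
  apply List.ext_getElem
  · simp
  · intro k h1 h2
    simp [Nat.mod_eq_of_lt h2, List.getElem?_eq_getElem h2]

-- A's outer loop invariant
theorem pv_A_loop (acc : List Int) (m : Nat) :
    (List.range m).foldl
      (fun (st : List Int × List Int) j =>
        let ne := (List.range acc.length).foldl
          (fun a i => a.set i (a.getD i 0 + acc.getD ((i + j + 1) % acc.length) 0)) st.2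
        (st.1 ++ ne, ne))
      ([0] ++ acc, acc)
    = ([0] ++ acc ++ (List.range m).flatMap
          (fun j => (List.range acc.length).map (fun i => pvW acc i (j + 2))),
       (List.range acc.length).map (fun i => pvW acc i (m + 1))) := by
  induction m with
  | zero =>
    have h1 : ∀ i, pvW acc i 1 = acc[i % acc.length]?.getD 0 :=
      fun i => by simp [pvW, List.getD_eq_getElem?_getD]
    simp [h1, pv_W_one]
  | succ m ih =>
    rw [List.range_succ, List.foldl_append, ih]
    simp only [List.foldl_cons, List.foldl_nil]
    have hne : (List.range acc.length).foldl
        (fun a i => a.set i (a.getD i 0 + acc.getD ((i + m + 1) % acc.length) 0))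
        ((List.range acc.length).map (fun i => pvW acc i (m + 1)))
        = (List.range acc.length).map (fun i => pvW acc i (m + 2)) := by
      rw [pv_foldl_set_map (fun a i => a + acc.getD ((i + m + 1) % acc.length) 0)
        acc.length _ (by simp)]
      simp only [List.drop_eq_nil_of_le (by simp : ((List.range acc.length).map
        (fun i => pvW acc i (m + 1))).length ≤ acc.length), List.append_nil]
      apply List.map_congr_left
      intro i hi
      simp only [List.mem_range] at hi
      have : ((List.range acc.length).map (fun i => pvW acc i (m + 1))).getD i 0
          = pvW acc i (m + 1) := by
        simp [List.getD_eq_getElem?_getD, List.getElem?_eq_getElem, hi]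
      rw [this]
      have := pv_window_succ acc i (m + 1)
      rw [show i + m + 1 = i + (m + 1) by omega]
      omega
    rw [hne]
    simp [List.flatMap_append]

-- B's prefix fold builds the partial-sums table
theorem pv_pref_spec (xs : List Int) :
    ∀ (p : List Int) (s : Int),
    (xs.foldl (fun (st : List Int × Int) x => (st.1 ++ [st.2 + x], st.2 + x)) (p, s)).1
      = p ++ (List.range xs.length).map (fun t => s + (xs.take (t + 1)).sum) := by
  induction xs with
  | nil => simp
  | cons x xs ih =>
    intro p s
    simp only [List.foldl_cons, ih, List.length_cons, List.range_succ_eq_map]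
    simp [List.map_map, Function.comp, add_assoc]

theorem pv_pref_getD (xs : List Int) (t : Nat) (ht : t ≤ xs.length) :
    ((xs.foldl (fun (st : List Int × Int) x => (st.1 ++ [st.2 + x], st.2 + x))
      (([0] : List Int), (0 : Int))).1).getD t 0 = (xs.take t).sum := by
  rw [pv_pref_spec]
  cases t with
  | zero => simp
  | succ u =>
    have hu : u < xs.length := by omega
    simp [List.getD_eq_getElem?_getD, List.getElem?_append_right, List.getElem?_eq_getElem,
      List.getElem?_map, hu]

theorem pv_take_drop_sum (xs : List Int) :
    ∀ (L i : Nat), i + L ≤ xs.length →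
    ((xs.drop i).take L).sum = ((List.range L).map (fun k => xs.getD (i + k) 0)).sum := by
  intro L
  induction L with
  | zero => simp
  | succ L ih =>
    intro i h
    have hiL : i + L < xs.length := by omega
    rw [List.range_succ, List.map_append, List.sum_append, ← ih i (by omega), List.take_succ]
    have : (xs.drop i)[L]? = some xs[i + L] := by
      rw [List.getElem?_drop, List.getElem?_eq_getElem (by omega)]
    simp [this, List.getD_eq_getElem?_getD, List.getElem?_eq_getElem hiL]

theorem pv_doubled_getD (xs : List Int) (t : Nat) (ht : t < 2 * xs.length) :
    (xs ++ xs).getD t 0 = xs.getD (t % xs.length) 0 := by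
  by_cases h : t < xs.length
  · rw [Nat.mod_eq_of_lt h]
    simp [List.getD_eq_getElem?_getD, List.getElem?_append_left h]
  · have h1 : xs.length ≤ t := by omega
    have h2 : t - xs.length < xs.length := by omega
    have h3 : t % xs.length = t - xs.length := by
      rw [Nat.mod_eq_sub_mod h1, Nat.mod_eq_of_lt h2]
    rw [h3]
    simp [List.getD_eq_getElem?_getD, List.getElem?_append_right h1]

-- B's prefix difference computes the cyclic window sum
theorem pv_diff_eq_window (xs : List Int) (i L : Nat) (hi : i < xs.length)
    (hL : L ≤ xs.length) :
    (((xs ++ xs).foldl (fun (st : List Int × Int) x => (st.1 ++ [st.2 + x], st.2 + x))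
      (([0] : List Int), (0 : Int))).1).getD (i + L) 0
    - (((xs ++ xs).foldl (fun (st : List Int × Int) x => (st.1 ++ [st.2 + x], st.2 + x))
      (([0] : List Int), (0 : Int))).1).getD i 0
    = pvW xs i L := by
  have hlen : (xs ++ xs).length = 2 * xs.length := by simp; omega
  rw [pv_pref_getD _ _ (by omega), pv_pref_getD _ _ (by omega)]
  have : ((xs ++ xs).take (i + L)).sum = ((xs ++ xs).take i).sum + (((xs ++ xs).drop i).take L).sum := by
    rw [List.take_add, List.sum_append]
  rw [this, pv_take_drop_sum (xs ++ xs) L i (by omega)]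
  have hmap : (List.range L).map (fun k => (xs ++ xs).getD (i + k) 0)
      = (List.range L).map (fun k => xs.getD ((i + k) % xs.length) 0) := by
    apply List.map_congr_left
    intro k hk
    simp only [List.mem_range] at hk
    exact pv_doubled_getD xs (i + k) (by omega)
  rw [hmap]
  simp [pvW]

theorem pv_total (xs : List Int) :
    (((xs ++ xs).foldl (fun (st : List Int × Int) x => (st.1 ++ [st.2 + x], st.2 + x))
      (([0] : List Int), (0 : Int))).1).getD xs.length 0 = xs.sum := by
  rw [pv_pref_getD _ _ (by simp), List.take_left]

-- ===== VERDICT (by name: the statement is the Claim_ definition above) =====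
theorem Cyclospectrum_spec : Claim_equal_Cyclospectrum := by
  intro masses _
  unfold Spec_Cyclospectrum Cyclospectrum Cyclospectrum_alt
  simp only []
  rw [pv_A_loop]
  congr 1
  -- reduce B's nested append-folds to a flatMap of maps
  simp only [PySem.List.foldl_append_singleton_eq_map, PySem.List.foldl_append_eq_flatMap]
  rw [List.range'_eq_map_range]
  rw [List.flatMap_map]
  congr 2
  · -- the flattened middle parts agree elementwise
    apply List.flatMap_congr
    intro j hj
    simp only [List.mem_range] at hj
    apply List.map_congr_left
    intro i hi
    simp only [List.mem_range] at hi
    rw [Nat.add_comm 2 j]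
    exact (pv_diff_eq_window masses i (j + 2) hi (by omega)).symm
  · rw [pv_total]
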